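-- pv_equiv track=rewrite | github.com/shiyutang/DL-Prep | 04_Algorithms/Leetcode/JZ38 数字在排序数组中出现的次数.py | GetNumberOfK
-- ===== SOURCE A (Python) =====
-- def GetNumberOfK(data, k):
--     cnt = 0
--     for i in data:
--         if i == k:
--             cnt += 1
--         elif i > k:
--             break
--     return cnt
-- ===== SOURCE B (Python) =====
-- def GetNumberOfK(data, k):
--     # two-phase: find the cut point (first element > k), then count k in the prefix slice
--     cut = 0
--     while cut < len(data) and data[cut] <= k:
--         cut += 1
--     return data[:cut].count(k)
-- ===== Notes on version B (the rewrite author's own statement) =====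
-- stated objective: alternative
-- what changed: replaces the single-pass counter loop with early break by a two-phase scheme: an index scan that finds the first element greater than k, then list.count on the prefix slice
import Mathlib
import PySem

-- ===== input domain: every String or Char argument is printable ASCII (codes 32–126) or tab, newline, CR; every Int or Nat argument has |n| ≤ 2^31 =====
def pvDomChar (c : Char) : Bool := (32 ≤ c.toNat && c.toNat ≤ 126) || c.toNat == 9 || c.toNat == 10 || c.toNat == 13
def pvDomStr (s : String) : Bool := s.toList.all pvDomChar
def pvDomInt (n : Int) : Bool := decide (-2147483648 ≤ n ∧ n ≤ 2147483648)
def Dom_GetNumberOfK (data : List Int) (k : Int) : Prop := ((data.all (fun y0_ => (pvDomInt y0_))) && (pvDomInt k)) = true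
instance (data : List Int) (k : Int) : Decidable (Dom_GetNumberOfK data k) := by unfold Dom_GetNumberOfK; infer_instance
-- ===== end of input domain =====

-- B replaces A's counter-with-break loop by a cut-point scan plus a slice count; same O(n) cost, different decomposition.

-- ===== PORT A =====
-- 'for i in data: … break' as structural recursion over data with the running cnt
def GetNumberOfK.loopA (k : Int) : List Int → Int → Int
  | [], cnt => cnt
  | i :: rest, cnt =>
    if i = k then GetNumberOfK.loopA k rest (cnt + 1)
    else if i > k then cnt
    else GetNumberOfK.loopA k rest cnt

def GetNumberOfK (data : List Int) (k : Int) : Int :=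
  GetNumberOfK.loopA k data 0

-- ===== PORT B =====
-- the 'while cut < len(data) and data[cut] <= k: cut += 1' scan, as recursion over the unscanned suffix
def GetNumberOfK_alt.cut (k : Int) : List Int → Nat
  | [] => 0
  | x :: rest => if x ≤ k then GetNumberOfK_alt.cut k rest + 1 else 0

def GetNumberOfK_alt (data : List Int) (k : Int) : Int :=
  PySem.List.count (data.take (GetNumberOfK_alt.cut k data)) k

-- ===== PRECONDITION & SPEC =====
def Spec_GetNumberOfK (data : List Int) (k : Int) (out : Int) : Prop := out = GetNumberOfK_alt data k
instance (data : List Int) (k : Int) (out : Int) : Decidable (Spec_GetNumberOfK data k out) := by unfold Spec_GetNumberOfK; infer_instance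

-- ===== CLAIM (what is proved, stated in full; the proofs are below) =====
def Claim_equal_GetNumberOfK : Prop := ∀ (data : List Int) (k : Int), Dom_GetNumberOfK data k → Spec_GetNumberOfK data k (GetNumberOfK data k)

-- ===== LEMMAS AND PROOFS =====
theorem loopA_eq (k : Int) (data : List Int) (cnt : Int) :
    GetNumberOfK.loopA k data cnt
      = cnt + PySem.List.count (data.take (GetNumberOfK_alt.cut k data)) k := by
  induction data generalizing cnt with
  | nil => simp [GetNumberOfK.loopA, GetNumberOfK_alt.cut, PySem.List.count]
  | cons x rest ih =>
    by_cases hx : x = k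
    · subst hx
      simp [GetNumberOfK.loopA, GetNumberOfK_alt.cut, ih, PySem.List.count]; ring
    · by_cases hgt : x > k
      · have hle : ¬ x ≤ k := by omega
        simp [GetNumberOfK.loopA, GetNumberOfK_alt.cut, hx, hgt, hle, PySem.List.count]
      · have hle : x ≤ k := by omega
        simp [GetNumberOfK.loopA, GetNumberOfK_alt.cut, hx, hgt, hle, ih, PySem.List.count]

-- ===== VERDICT (by name: the statement is the Claim_ definition above) =====
theorem GetNumberOfK_spec : Claim_equal_GetNumberOfK := by
  intro data k _
  unfold Spec_GetNumberOfK GetNumberOfK GetNumberOfK_alt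
  simpa using loopA_eq k data 0
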